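-- pv_equiv track=rewrite | github.com/yokinoshitayoki/DeeCode-Analyst | src/graph_builder.py | _create_node_mapping
-- ===== SOURCE A (Python) =====
-- from typing import List, Dict, Any, Optional, Tuple, Set
--
-- def _create_node_mapping(nodes: List[Dict]) -> Dict[str, List[str]]:
--     """创建节点名称到ID的映射"""
--     mapping = {}
--
--     for node in nodes:
--         name = node.get('name', '')
--         node_id = node.get('id', '')
--
--         if name not in mapping:
--             mapping[name] = []
--         mapping[name].append(node_id)
--
--     return mapping
-- ===== SOURCE B (Python) =====
-- def _create_node_mapping(nodes):
--     """创建节点名称到ID的映射"""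
--     pairs = [(node.get('name', ''), node.get('id', '')) for node in nodes]
--     return {name: [i for n, i in pairs if n == name]
--             for name in dict.fromkeys(n for n, _ in pairs)}
-- ===== Notes on version B (the rewrite author's own statement) =====
-- stated objective: alternative
-- what changed: Replaces the incremental membership-checked dict build with a two-phase pass: extract (name,id) pairs once, dedup the names in first-seen order, then build each name's id list by a filtering comprehension over the pairs.
import Mathlib
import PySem

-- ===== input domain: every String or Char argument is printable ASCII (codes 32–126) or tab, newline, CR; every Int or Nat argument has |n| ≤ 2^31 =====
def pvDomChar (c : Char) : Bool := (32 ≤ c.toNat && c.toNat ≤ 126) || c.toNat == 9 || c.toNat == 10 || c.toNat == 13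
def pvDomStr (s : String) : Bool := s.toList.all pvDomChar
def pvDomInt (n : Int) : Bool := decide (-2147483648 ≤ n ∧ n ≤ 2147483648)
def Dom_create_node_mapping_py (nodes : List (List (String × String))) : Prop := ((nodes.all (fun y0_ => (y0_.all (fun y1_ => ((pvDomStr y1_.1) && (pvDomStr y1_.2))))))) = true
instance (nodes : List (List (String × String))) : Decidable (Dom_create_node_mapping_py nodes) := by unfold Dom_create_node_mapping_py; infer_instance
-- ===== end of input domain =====

-- B builds the mapping in two phases (pair extraction, name dedup, per-name filtering scan) instead of A's incremental membership-checked dict build; same return value.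


-- ===== PORT A =====
-- literal port of A: fold over the nodes, membership-check, insert [] if absent, then append the id
def create_node_mapping_py (nodes : List (List (String × String))) : List (String × List String) :=
  (nodes.foldl
    (fun (mapping : PySem.Dict String (List String)) node =>
      let name := (PySem.Dict.mk node).getD "name" ""
      let node_id := (PySem.Dict.mk node).getD "id" ""
      let mapping := if mapping.contains name then mapping else mapping.insert name []
      mapping.modify name [] (fun l => l ++ [node_id]))
    PySem.Dict.empty).items

-- ===== PORT B =====
-- literal port of B: extract (name, id) pairs, dedup names in first-seen order, filter ids per name
def create_node_mapping_py_alt (nodes : List (List (String × String))) : List (String × List String) :=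
  let pairs := nodes.map (fun node => ((PySem.Dict.mk node).getD "name" "", (PySem.Dict.mk node).getD "id" ""))
  (PySem.List.dedup (pairs.map (fun p => p.1))).map
    (fun name => (name, (pairs.filter (fun p => p.1 == name)).map (fun p => p.2)))

-- ===== PRECONDITION & SPEC =====
def Spec_create_node_mapping_py (nodes : List (List (String × String))) (out : List (String × List String)) : Prop := out = create_node_mapping_py_alt nodes
instance (nodes : List (List (String × String))) (out : List (String × List String)) : Decidable (Spec_create_node_mapping_py nodes out) := by unfold Spec_create_node_mapping_py; infer_instance

-- ===== CLAIM (what is proved, stated in full; the proofs are below) =====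
def Claim_equal_create_node_mapping_py : Prop := ∀ (nodes : List (List (String × String))), Dom_create_node_mapping_py nodes → Spec_create_node_mapping_py nodes (create_node_mapping_py nodes)

-- ===== LEMMAS AND PROOFS =====

-- A's per-node step (insert [] if absent, then append) is exactly a modify with default []
lemma stepA_eq_modify (m : PySem.Dict String (List String)) (name nid : String) :
    (if m.contains name then m else m.insert name []).modify name [] (fun l => l ++ [nid])
      = m.modify name [] (fun l => l ++ [nid]) := by
  by_cases h : m.contains name
  · simp [h]
  · simp only [h, Bool.false_eq_true, if_false]
    simp [PySem.Dict.modify, PySem.Dict.getD_insert_self, PySem.Dict.insert_insert_self,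
      PySem.Dict.getD_of_not_contains m [] (by simpa using h)]

-- A's whole fold is the grouping fold over the extracted pairs
lemma foldA_eq_pairs (nodes : List (List (String × String))) :
    nodes.foldl
      (fun (mapping : PySem.Dict String (List String)) node =>
        let name := (PySem.Dict.mk node).getD "name" ""
        let node_id := (PySem.Dict.mk node).getD "id" ""
        let mapping := if mapping.contains name then mapping else mapping.insert name []
        mapping.modify name [] (fun l => l ++ [node_id]))
      PySem.Dict.empty
    = (nodes.map (fun node => ((PySem.Dict.mk node).getD "name" "", (PySem.Dict.mk node).getD "id" ""))).foldl
        (fun (d : PySem.Dict String (List String)) p => d.modify p.1 [] (fun l => l ++ [p.2]))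
        PySem.Dict.empty := by
  rw [List.foldl_map]
  refine PySem.List.foldl_congr_mem nodes _ _ _ ?_
  intro d node _
  exact stepA_eq_modify d _ _

-- ===== VERDICT (by name: the statement is the Claim_ definition above) =====
theorem create_node_mapping_py_spec : Claim_equal_create_node_mapping_py := by
  intro nodes _
  unfold Spec_create_node_mapping_py create_node_mapping_py create_node_mapping_py_alt
  rw [foldA_eq_pairs]
  set pairs := nodes.map (fun node => ((PySem.Dict.mk node).getD "name" "", (PySem.Dict.mk node).getD "id" "")) with hp
  set d := pairs.foldl (fun (d : PySem.Dict String (List String)) p => d.modify p.1 [] (fun l => l ++ [p.2])) PySem.Dict.empty with hd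
  have hnd : d.keys.Nodup := by
    rw [hd]
    exact PySem.Dict.nodup_keys_foldl_modify_key pairs (fun p => p.1) [] (fun _ p => fun l => l ++ [p.2]) _ PySem.Dict.nodup_keys_empty
  have hkeys : d.keys = PySem.List.dedup (pairs.map (fun p => p.1)) := by
    rw [hd, PySem.Dict.keys_foldl_modify_key]
    simp [PySem.Set.update_nil_left, PySem.Dict.keys_empty, PySem.List.dedup_eq_ofList]
  rw [PySem.Dict.items_eq_map_keys d hnd [], hkeys]
  refine List.map_congr_left ?_
  intro name _
  have := PySem.Dict.getD_foldl_modify_append (d := PySem.Dict.empty) (l := pairs) (c := name)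
  simp only [← hd, PySem.Dict.getD_empty, List.nil_append] at this
  rw [this]
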